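-- pv_equiv track=rewrite | github.com/jlieth/leetcode | remove-k-digits/solution.py | remove_out_of_order
-- ===== SOURCE A (Python) =====
-- from typing import Tuple
--
-- def remove_out_of_order(num: str) -> Tuple[bool, str]:
--     """
--     finds and removes the first digit in the input string that is
--     greater than the digit that follows it
--     """
--     result = ""
--     removed = False
--     for idx, digit in enumerate(num):
--         # don't check last digit in string and just add it
--         if idx == len(num) - 1:
--             result += digit
--             break
--
--         # found the digit: add remaining digits to result and break
--         if digit > num[idx + 1]:
--             removed = True
--             result += num[idx + 1 :]
--             break
--
--         result += digit
--
--     return removed, result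
-- ===== SOURCE B (Python) =====
-- def remove_out_of_order(num: str):
--     # single scan for the first descent, then one slice concatenation
--     for i in range(len(num) - 1):
--         if num[i] > num[i + 1]:
--             return True, num[:i] + num[i + 1:]
--     return False, num
-- ===== Notes on version B (the rewrite author's own statement) =====
-- stated objective: faster
-- what changed: B scans once for the first index with num[i] > num[i+1] and builds the output with a single slice concatenation, instead of A's loop that grows the result string character by character (quadratic string copying).
import Mathlib
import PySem

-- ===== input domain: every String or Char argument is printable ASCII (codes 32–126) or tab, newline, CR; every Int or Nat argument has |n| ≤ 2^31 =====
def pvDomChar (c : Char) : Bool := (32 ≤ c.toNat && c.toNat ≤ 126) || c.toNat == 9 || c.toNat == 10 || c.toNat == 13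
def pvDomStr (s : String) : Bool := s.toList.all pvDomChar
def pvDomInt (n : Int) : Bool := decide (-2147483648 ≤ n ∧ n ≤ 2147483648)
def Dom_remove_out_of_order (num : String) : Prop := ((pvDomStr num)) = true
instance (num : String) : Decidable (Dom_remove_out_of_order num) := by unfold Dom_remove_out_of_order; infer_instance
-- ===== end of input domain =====

-- B replaces A's character-by-character result building with one scan for the
-- first descent index followed by a single slice concatenation (objective: faster).

-- ===== PORT A =====
-- the for-loop of A: iterates over the characters; `rest = []` is exactly the
-- `idx == len(num) - 1` test (last character), `rest` itself is `num[idx+1:]`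
def pvLoopA : List Char → List Char → Bool → Bool × List Char
  | [], result, removed => (removed, result)
  | d :: rest, result, removed =>
    match rest with
    | [] => (removed, result ++ [d])                     -- last digit: add it and break
    | e :: _ =>
      if e < d then (true, result ++ rest)               -- digit > num[idx+1]: removed = True, add num[idx+1:], break
      else pvLoopA rest (result ++ [d]) removed          -- result += digit

def remove_out_of_order (num : String) : Bool × String :=
  let (removed, result) := pvLoopA num.toList [] false
  (removed, String.ofList result)

-- ===== PORT B =====
-- index of the first i with num[i] > num[i+1], scanning adjacent pairs once
def pvFirstDescent : List Char → Option Nat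
  | d :: e :: rest => if e < d then some 0 else (pvFirstDescent (e :: rest)).map (· + 1)
  | _ => none

def remove_out_of_order_alt (num : String) : Bool × String :=
  let cs := num.toList
  match pvFirstDescent cs with
  | some i => (true, String.ofList (cs.take i ++ cs.drop (i + 1)))  -- num[:i] + num[i+1:] (nonneg bounds: slice = take/drop)
  | none => (false, num)

-- ===== PRECONDITION & SPEC =====
def Spec_remove_out_of_order (num : String) (out : Bool × String) : Prop := out = remove_out_of_order_alt num
instance (num : String) (out : Bool × String) : Decidable (Spec_remove_out_of_order num out) := by unfold Spec_remove_out_of_order; infer_instance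

-- ===== CLAIM (what is proved, stated in full; the proofs are below) =====
def Claim_equal_remove_out_of_order : Prop := ∀ (num : String), Dom_remove_out_of_order num → Spec_remove_out_of_order num (remove_out_of_order num)

-- ===== LEMMAS AND PROOFS =====

theorem pvLoopA_eq (cs : List Char) : ∀ (result : List Char),
    pvLoopA cs result false =
      match pvFirstDescent cs with
      | some i => (true, result ++ (cs.take i ++ cs.drop (i + 1)))
      | none => (false, result ++ cs) := by
  induction cs with
  | nil => intro result; simp [pvLoopA, pvFirstDescent]
  | cons d rest ih =>
    intro result
    match rest with
    | [] => simp [pvLoopA, pvFirstDescent]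
    | e :: rest' =>
      by_cases h : e < d
      · simp [pvLoopA, pvFirstDescent, h]
      · rw [show pvLoopA (d :: e :: rest') result false
              = pvLoopA (e :: rest') (result ++ [d]) false by simp [pvLoopA, h],
            ih (result ++ [d])]
        simp only [pvFirstDescent, if_neg h]
        cases hfd : pvFirstDescent (e :: rest') with
        | none => simp
        | some i => simp [List.take_succ_cons, List.drop_succ_cons]

-- ===== VERDICT (by name: the statement is the Claim_ definition above) =====
theorem remove_out_of_order_spec : Claim_equal_remove_out_of_order := by
  intro num _
  unfold Spec_remove_out_of_order remove_out_of_order remove_out_of_order_alt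
  rw [pvLoopA_eq]
  cases h : pvFirstDescent num.toList with
  | none => simp [h, String.ofList_toList]
  | some i => simp [h]
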